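-- pv_equiv track=rewrite | github.com/bambinos/kulprit | kulprit/projection/search_strategies.py | _missing_lower_order_terms
-- ===== SOURCE A (Python) =====
-- from itertools import combinations
--
-- def _missing_lower_order_terms(interaction_term, term_list):
--     """Return a set of missing lower-order terms for a given interaction term."""
--     factors = interaction_term.split(":")
--     missing = set()
--
--     for k in range(1, len(factors)):
--         for combo in combinations(factors, k):
--             lower_term = ":".join(combo)
--             if lower_term not in term_list:
--                 missing.add(lower_term)
--     return missing
-- ===== SOURCE B (Python) =====
-- def _missing_lower_order_terms(interaction_term, term_list):
--     """BFS over subset sizes: extend each combination by the factors after its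
--     last element, level by level, testing membership against a prebuilt set."""
--     factors = interaction_term.split(":")
--     known = set(term_list)
--     missing = set()
--     level = [([factors[i]], factors[i + 1:]) for i in range(len(factors))]
--     for _ in range(len(factors) - 1):
--         next_level = []
--         for combo, rest in level:
--             term = ":".join(combo)
--             if term not in known:
--                 missing.add(term)
--             for j in range(len(rest)):
--                 next_level.append((combo + [rest[j]], rest[j + 1:]))
--         level = next_level
--     return missing
-- ===== Notes on version B (the rewrite author's own statement) =====
-- stated objective: alternative
-- what changed: Replaces the per-size itertools.combinations restarts with a single breadth-first pass that extends each combination by the factors after its last element, level by level, and tests candidates against a prebuilt set of term_list instead of the list itself.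
import Mathlib
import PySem

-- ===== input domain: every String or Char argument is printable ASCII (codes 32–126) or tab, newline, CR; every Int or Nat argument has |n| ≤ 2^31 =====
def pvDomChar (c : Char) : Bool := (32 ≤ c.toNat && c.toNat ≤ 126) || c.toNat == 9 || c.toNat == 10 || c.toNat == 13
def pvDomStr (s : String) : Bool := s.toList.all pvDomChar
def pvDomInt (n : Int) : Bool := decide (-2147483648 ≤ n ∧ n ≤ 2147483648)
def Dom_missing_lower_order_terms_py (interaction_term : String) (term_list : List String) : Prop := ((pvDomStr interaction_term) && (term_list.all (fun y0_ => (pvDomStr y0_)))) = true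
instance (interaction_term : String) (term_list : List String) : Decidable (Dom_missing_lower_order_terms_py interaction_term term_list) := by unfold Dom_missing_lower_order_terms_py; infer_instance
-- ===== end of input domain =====

-- B replaces A's per-size itertools.combinations restarts by a single breadth-first
-- extension of each combination with the factors after its last element, testing
-- membership against a prebuilt set instead of scanning term_list.

-- ===== PORT A =====
def missing_lower_order_terms_py (interaction_term : String) (term_list : List String) : List String :=
  let factors := (PySem.Str.split? interaction_term ":").getD []
  (PySem.List.pyRange 1 (factors.length : Int) 1).foldl
    (fun missing k =>
      (PySem.List.combinations factors k.toNat).foldl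
        (fun missing combo =>
          let lower := PySem.Str.join ":" combo
          if !(term_list.contains lower) then PySem.Set.add missing lower else missing)
        missing)
    PySem.Set.empty

-- ===== PORT B =====
def missing_lower_order_terms_py_alt (interaction_term : String) (term_list : List String) : List String :=
  let factors := (PySem.Str.split? interaction_term ":").getD []
  let known : PySem.Set String := PySem.Set.ofList term_list
  let level : List (List String × List String) :=
    (PySem.List.pyRange 0 (factors.length : Int) 1).map
      (fun i => ([PySem.List.pyGetD factors i ""], PySem.List.slice factors (some (i + 1)) none))
  let res :=
    (PySem.List.pyRange 0 ((factors.length : Int) - 1) 1).foldl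
      (fun st _ =>
        st.2.foldl
          (fun st2 p =>
            let term := PySem.Str.join ":" p.1
            ((if !(PySem.Set.contains known term) then PySem.Set.add st2.1 term else st2.1),
             (PySem.List.pyRange 0 (p.2.length : Int) 1).foldl
               (fun nl j =>
                 nl ++ [(p.1 ++ [PySem.List.pyGetD p.2 j ""],
                         PySem.List.slice p.2 (some (j + 1)) none)])
               st2.2))
          (st.1, ([] : List (List String × List String))))
      (PySem.Set.empty, level)
  res.1

-- ===== PRECONDITION & SPEC =====
def Spec_missing_lower_order_terms_py (interaction_term : String) (term_list : List String) (out : List String) : Prop := out = missing_lower_order_terms_py_alt interaction_term term_list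
instance (interaction_term : String) (term_list : List String) (out : List String) : Decidable (Spec_missing_lower_order_terms_py interaction_term term_list out) := by unfold Spec_missing_lower_order_terms_py; infer_instance

-- ===== CLAIM (what is proved, stated in full; the proofs are below) =====
def Claim_equal_missing_lower_order_terms_py : Prop := ∀ (interaction_term : String) (term_list : List String), Dom_missing_lower_order_terms_py interaction_term term_list → Spec_missing_lower_order_terms_py interaction_term term_list (missing_lower_order_terms_py interaction_term term_list)

-- ===== LEMMAS AND PROOFS =====

-- the element picks of a list: (xs[j], xs[j+1:]) for each position j, in order
def pvPicks : List String → List (String × List String)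
  | [] => []
  | y :: ys => (y, ys) :: pvPicks ys

-- each size-r combination of xs together with the suffix of xs after its last element
def pvCombRem : List String → Nat → List (List String × List String)
  | xs, 0 => [([], xs)]
  | [], _ + 1 => []
  | x :: xs, r + 1 =>
      ((pvCombRem xs r).map (fun p => (x :: p.1, p.2))) ++ pvCombRem xs (r + 1)

-- one-step extensions of a combination by each later factor
def pvExt (p : List String × List String) : List (List String × List String) :=
  (pvPicks p.2).map (fun q => (p.1 ++ [q.1], q.2))

-- A's membership-test-and-add, on the shared term_list
def pvUpd (tl : List String) (mis : List String) (t : String) : List String :=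
  if !(tl.contains t) then PySem.Set.add mis t else mis

-- A's inner loop for one size kk
def pvBodyA (factors tl : List String) (mis : List String) (kk : Int) : List String :=
  (PySem.List.combinations factors kk.toNat).foldl
    (fun m c => pvUpd tl m (PySem.Str.join ":" c)) mis

-- B's outer-loop body, with the set lookups already reduced to list facts
def pvStep (tl : List String) (st : List String × List (List String × List String)) :
    List String × List (List String × List String) :=
  st.2.foldl
    (fun st2 p => (pvUpd tl st2.1 (PySem.Str.join ":" p.1), st2.2 ++ pvExt p))
    (st.1, [])

theorem pvCombRem_fst (xs : List String) (r : Nat) :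
    (pvCombRem xs r).map (·.1) = PySem.List.combinations xs r := by
  induction xs generalizing r with
  | nil =>
      cases r with
      | zero => simp [pvCombRem, PySem.List.combinations_zero]
      | succ r => simp [pvCombRem, PySem.List.combinations_nil_succ]
  | cons x xs ih =>
      cases r with
      | zero => simp [pvCombRem, PySem.List.combinations_zero]
      | succ r =>
          simp [pvCombRem, PySem.List.combinations_cons_succ, ← ih, List.map_map]

theorem pvCombRem_one (xs : List String) :
    pvCombRem xs 1 = (pvPicks xs).map (fun q => ([q.1], q.2)) := by
  induction xs with
  | nil => simp [pvCombRem, pvPicks]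
  | cons x xs ih => simp [pvCombRem, pvPicks, ih]

theorem pvExt_prepend (x : String) (p : List String × List String) :
    pvExt (x :: p.1, p.2) = (pvExt p).map (fun q => (x :: q.1, q.2)) := by
  simp [pvExt, List.map_map]

theorem pvCombRem_step (xs : List String) (r : Nat) :
    (pvCombRem xs r).flatMap pvExt = pvCombRem xs (r + 1) := by
  induction xs generalizing r with
  | nil =>
      cases r with
      | zero => simp [pvCombRem, pvExt, pvPicks]
      | succ r => simp [pvCombRem]
  | cons x xs ih =>
      cases r with
      | zero =>
          simp [pvCombRem, pvExt, pvPicks, pvCombRem_one]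
      | succ r =>
          have hpre : ∀ (L : List (List String × List String)),
              (L.map (fun p => (x :: p.1, p.2))).flatMap pvExt
                = (L.flatMap pvExt).map (fun q => (x :: q.1, q.2)) := by
            intro L
            rw [List.flatMap_map, List.map_flatMap]
            refine List.flatMap_congr ?_  -- pointwise
            intro p _
            exact pvExt_prepend x p
          simp only [pvCombRem, List.flatMap_append, hpre, ih]

theorem pvPicks_eq_map_range (xs : List String) :
    (List.range xs.length).map (fun j => (xs.getD j "", xs.drop (j + 1))) = pvPicks xs := by
  induction xs with
  | nil => simp [pvPicks]
  | cons x xs ih =>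
      rw [List.length_cons, List.range_succ_eq_map]
      simp only [List.map_cons, List.map_map]
      simp [pvPicks, Function.comp, ← ih]

-- B's j-loop appends exactly the extensions of p
theorem pvInnerExt (p : List String × List String) (acc : List (List String × List String)) :
    (PySem.List.pyRange 0 (p.2.length : Int) 1).foldl
      (fun nl j =>
        nl ++ [(p.1 ++ [PySem.List.pyGetD p.2 j ""], PySem.List.slice p.2 (some (j + 1)) none)])
      acc = acc ++ pvExt p := by
  rw [PySem.List.pyRange_zero_nat, List.foldl_map, PySem.List.foldl_append_singleton_eq_map]
  congr 1
  rw [pvExt, ← pvPicks_eq_map_range, List.map_map]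
  refine List.map_congr_left ?_
  intro j hj
  rw [List.mem_range] at hj
  simp only [Function.comp]
  rw [PySem.List.pyGetD_natCast, PySem.List.slice_from p.2 (by positivity)]
  have hd : ((j : Int) + 1).toNat = j + 1 := by omega
  rw [hd]

-- B's level-1 initialisation is pvCombRem factors 1
theorem pvLevelInit (factors : List String) :
    (PySem.List.pyRange 0 (factors.length : Int) 1).map
      (fun i => ([PySem.List.pyGetD factors i ""], PySem.List.slice factors (some (i + 1)) none))
      = pvCombRem factors 1 := by
  rw [PySem.List.pyRange_zero_nat, List.map_map, pvCombRem_one, ← pvPicks_eq_map_range,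
    List.map_map]
  refine List.map_congr_left ?_
  intro j hj
  rw [List.mem_range] at hj
  simp only [Function.comp]
  rw [PySem.List.pyGetD_natCast, PySem.List.slice_from factors (by positivity)]
  have hd : ((j : Int) + 1).toNat = j + 1 := by omega
  rw [hd]

-- one pvStep from level k: records size-k terms, builds level k+1
theorem pvStep_combRem (factors tl : List String) (k : Nat) (mis : List String) :
    pvStep tl (mis, pvCombRem factors k)
      = (pvBodyA factors tl mis (k : Int), pvCombRem factors (k + 1)) := by
  unfold pvStep
  rw [PySem.List.foldl_prod_mk
        (f := fun m p => pvUpd tl m (PySem.Str.join ":" p.1))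
        (g := fun nl p => nl ++ pvExt p)]
  simp only
  congr 1
  · rw [pvBodyA, ← pvCombRem_fst, List.foldl_map, Int.toNat_natCast]
  · rw [PySem.List.foldl_append_eq_flatMap, pvCombRem_step]
    simp

-- the whole of B's outer loop, as A's per-size folds
theorem pvMain (factors tl : List String) (L : List Int) (k : Nat) (mis : List String) :
    (L.foldl (fun st (_ : Int) => pvStep tl st) (mis, pvCombRem factors k)).1
      = (PySem.List.pyRange (k : Int) ((k : Int) + L.length) 1).foldl
          (pvBodyA factors tl) mis := by
  induction L generalizing k mis with
  | nil =>
      rw [List.foldl_nil]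
      rw [PySem.List.pyRange_one_eq_nil (by simp)]
      rfl
  | cons a L ih =>
      rw [List.foldl_cons, pvStep_combRem, ih, List.length_cons]
      have he : ((k : Int) + ((L.length + 1 : Nat) : Int)) = ((k : Int) + 1) + (L.length : Int) := by
        push_cast; ring
      have hr : PySem.List.pyRange (k : Int) ((k : Int) + ((L.length + 1 : Nat) : Int)) 1
          = (k : Int) :: PySem.List.pyRange ((k : Int) + 1) (((k : Int) + 1) + (L.length : Int)) 1 := by
        rw [he, PySem.List.pyRange_one_cons (by omega)]
      rw [hr, List.foldl_cons]
      have e : (((k + 1 : Nat)) : Int) = (k : Int) + 1 := by push_cast; ring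
      rw [e]

-- B's literal outer body is pvStep
theorem pvBodyB_eq_step (tl : List String)
    (st : List String × List (List String × List String)) :
    st.2.foldl
      (fun st2 p =>
        ((if !(PySem.Set.contains (PySem.Set.ofList tl) (PySem.Str.join ":" p.1))
          then PySem.Set.add st2.1 (PySem.Str.join ":" p.1) else st2.1),
         (PySem.List.pyRange 0 (p.2.length : Int) 1).foldl
           (fun nl j =>
             nl ++ [(p.1 ++ [PySem.List.pyGetD p.2 j ""],
                     PySem.List.slice p.2 (some (j + 1)) none)])
           st2.2))
      (st.1, ([] : List (List String × List String))) = pvStep tl st := by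
  unfold pvStep
  refine PySem.List.foldl_congr_mem _ _ _ _ ?_
  intro acc p _
  rw [pvInnerExt]
  unfold pvUpd
  simp only [PySem.Set.contains_eq_listContains, List.contains_eq_mem, PySem.Set.mem_ofList]

-- ===== VERDICT (by name: the statement is the Claim_ definition above) =====
theorem missing_lower_order_terms_py_spec : Claim_equal_missing_lower_order_terms_py := by
  intro interaction_term term_list _
  unfold Spec_missing_lower_order_terms_py missing_lower_order_terms_py
    missing_lower_order_terms_py_alt
  simp only []
  set factors := (PySem.Str.split? interaction_term ":").getD [] with hf
  rw [pvLevelInit]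
  have hcongr :
      (PySem.List.pyRange 0 ((factors.length : Int) - 1) 1).foldl
        (fun st (_ : Int) =>
          st.2.foldl
            (fun st2 p =>
              ((if !(PySem.Set.contains (PySem.Set.ofList term_list) (PySem.Str.join ":" p.1))
                then PySem.Set.add st2.1 (PySem.Str.join ":" p.1) else st2.1),
               (PySem.List.pyRange 0 (p.2.length : Int) 1).foldl
                 (fun nl j =>
                   nl ++ [(p.1 ++ [PySem.List.pyGetD p.2 j ""],
                           PySem.List.slice p.2 (some (j + 1)) none)])
                 st2.2))
            (st.1, ([] : List (List String × List String))))
        (PySem.Set.empty, pvCombRem factors 1)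
      = (PySem.List.pyRange 0 ((factors.length : Int) - 1) 1).foldl
          (fun st (_ : Int) => pvStep term_list st)
          (PySem.Set.empty, pvCombRem factors 1) := by
    refine PySem.List.foldl_congr_mem _ _ _ _ ?_
    intro acc x _
    exact pvBodyB_eq_step term_list acc
  rw [hcongr, pvMain factors term_list _ 1 PySem.Set.empty]
  have hlen : (PySem.List.pyRange 0 ((factors.length : Int) - 1) 1).length
      = ((factors.length : Int) - 1).toNat := by
    rw [PySem.List.length_pyRange_one]; congr 1; ring
  rw [hlen]
  have hrange : PySem.List.pyRange ((1 : Nat) : Int)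
      (((1 : Nat) : Int) + (((factors.length : Int) - 1).toNat : Int)) 1
      = PySem.List.pyRange 1 (factors.length : Int) 1 := by
    rcases Nat.eq_zero_or_pos factors.length with h | h
    · rw [h]
      rw [PySem.List.pyRange_one_eq_nil (by norm_num), PySem.List.pyRange_one_eq_nil (by norm_num)]
    · congr 1
      push_cast [Int.toNat_of_nonneg (by omega : (0 : Int) ≤ (factors.length : Int) - 1)]
      omega
  rw [hrange]
  rfl
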